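-- pv_equiv track=rewrite | github.com/q3c274/ISJ22 | code/dirtycat_dev/dirty_cat/minhash_encoder.py | get_unique_ngrams
-- ===== SOURCE A (Python) =====
-- def get_unique_ngrams(string, ngram_range):
--     """
--     Return a list of different n-grams in a string
--     """
--     spaces = ' '  # * (n // 2 + n % 2)
--     string = spaces + " ".join(string.lower().split()) + spaces
--     ngram_set = set()
--     for n in range(ngram_range[0], ngram_range[1] + 1):
--         string_list = [string[i:] for i in range(n)]
--         ngram_set |= set(zip(*string_list))
--     return ngram_set
-- ===== SOURCE B (Python) =====
-- def get_unique_ngrams(string, ngram_range):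
--     """
--     Return a list of different n-grams in a string
--     """
--     string = ' ' + " ".join(string.lower().split()) + ' '
--     chars = tuple(string)
--     ngram_set = set()
--     for n in range(max(ngram_range[0], 1), ngram_range[1] + 1):
--         for i in range(len(chars) - n + 1):
--             ngram_set.add(chars[i:i + n])
--     return ngram_set
-- ===== Notes on version B (the rewrite author's own statement) =====
-- stated objective: simpler
-- what changed: Replaces the zip(*[string[i:] for i in range(n)]) transpose trick with a direct index-based sliding-window scan that slices each n-gram tuple out of a char tuple, skipping n < 1 up front via max(ngram_range[0], 1).
import Mathlib
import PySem

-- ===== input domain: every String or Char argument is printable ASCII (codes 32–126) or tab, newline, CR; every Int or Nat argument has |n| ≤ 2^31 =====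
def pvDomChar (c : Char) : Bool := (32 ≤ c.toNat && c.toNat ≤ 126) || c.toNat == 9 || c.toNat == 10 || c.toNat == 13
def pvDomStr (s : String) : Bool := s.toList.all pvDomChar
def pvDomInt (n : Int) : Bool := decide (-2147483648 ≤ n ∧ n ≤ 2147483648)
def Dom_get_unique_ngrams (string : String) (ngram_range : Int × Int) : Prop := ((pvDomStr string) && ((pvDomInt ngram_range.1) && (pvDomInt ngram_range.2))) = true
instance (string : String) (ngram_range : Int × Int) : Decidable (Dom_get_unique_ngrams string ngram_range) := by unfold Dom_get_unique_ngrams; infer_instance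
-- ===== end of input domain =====

-- B replaces A's zip-of-shifted-suffixes transpose trick with a direct index-based
-- sliding-window scan per n (skipping n < 1 up front); objective: simpler.
-- Output is a Python set of char tuples: List (List String) of distinct elements, compared as a set.

-- ===== PORT A =====

-- Python's variadic zip(*lists) over character lists, step for step:
-- take the head of every list while all are nonempty.
def pyHeadsTails : List (List Char) → Option (List Char × List (List Char))
  | [] => some ([], [])
  | [] :: _ => none
  | (c :: t) :: rest => (pyHeadsTails rest).map (fun p => (c :: p.1, t :: p.2))

def pyZipGo : List Char → List (List Char) → List (List Char)
  | [], _ => []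
  | c :: t, rest =>
      match pyHeadsTails rest with
      | none => []
      | some (hs, ts) => (c :: hs) :: pyZipGo t ts

-- zip() with no iterables yields nothing
def pyZip : List (List Char) → List (List Char)
  | [] => []
  | l :: rest => pyZipGo l rest

def get_unique_ngrams (string : String) (ngram_range : Int × Int) : List (List String) :=
  -- string = ' ' + " ".join(string.lower().split()) + ' '
  let padded : List Char :=
    ' ' :: (PySem.Chars.join [' '] (PySem.Chars.split₀ (PySem.Chars.lower string.toList)) ++ [' '])
  (PySem.List.pyRange ngram_range.1 (ngram_range.2 + 1) 1).foldl
    (fun ngram_set n =>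
      -- string_list = [string[i:] for i in range(n)]
      let string_list := (PySem.List.pyRange 0 n 1).map (fun i => PySem.List.slice padded (some i) none)
      -- ngram_set |= set(zip(*string_list))   (tuple entries are one-char strings)
      PySem.Set.union ngram_set ((pyZip string_list).map (fun t => t.map Char.toString)))
    PySem.Set.empty

-- ===== PORT B =====

def get_unique_ngrams_alt (string : String) (ngram_range : Int × Int) : List (List String) :=
  let padded : List Char :=
    ' ' :: (PySem.Chars.join [' '] (PySem.Chars.split₀ (PySem.Chars.lower string.toList)) ++ [' '])
  (PySem.List.pyRange (max ngram_range.1 1) (ngram_range.2 + 1) 1).foldl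
    (fun ngram_set n =>
      (PySem.List.pyRange 0 ((padded.length : Int) - n + 1) 1).foldl
        (fun acc i =>
          PySem.Set.add acc ((PySem.List.slice padded (some i) (some (i + n))).map Char.toString))
        ngram_set)
    PySem.Set.empty

-- ===== PRECONDITION & SPEC =====
def Spec_get_unique_ngrams (string : String) (ngram_range : Int × Int) (out : List (List String)) : Prop := out = get_unique_ngrams_alt string ngram_range
instance (string : String) (ngram_range : Int × Int) (out : List (List String)) : Decidable (Spec_get_unique_ngrams string ngram_range out) := by unfold Spec_get_unique_ngrams; infer_instance

-- ===== CLAIM (what is proved, stated in full; the proofs are below) =====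
def Claim_equal_get_unique_ngrams : Prop := ∀ (string : String) (ngram_range : Int × Int), Dom_get_unique_ngrams string ngram_range → Spec_get_unique_ngrams string ngram_range (get_unique_ngrams string ngram_range)

-- ===== LEMMAS AND PROOFS =====

-- the list of suffixes [s, s.drop 1, …, s.drop (m-1)]
def pvSuffixes (s : List Char) (m : Nat) : List (List Char) :=
  (List.range m).map (s.drop ·)

theorem pvSuffixes_succ (s : List Char) (m : Nat) :
    pvSuffixes s (m + 1) = s :: pvSuffixes s.tail m := by
  unfold pvSuffixes
  rw [List.range_succ_eq_map, List.map_cons, List.drop_zero, List.map_map]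
  congr 1
  exact List.map_congr_left (fun a _ => by rw [Function.comp_apply, List.drop_tail])

theorem pvHeadsTails_suffixes (m : Nat) (t : List Char) :
    pyHeadsTails (pvSuffixes t m) =
      if m ≤ t.length then some (t.take m, pvSuffixes t.tail m) else none := by
  induction m generalizing t with
  | zero => simp [pvSuffixes, pyHeadsTails]
  | succ m ih =>
      rw [pvSuffixes_succ]
      cases t with
      | nil =>
          rw [List.tail_nil, if_neg (by simp)]
          simp [pyHeadsTails]
      | cons c t' =>
          rw [List.tail_cons]
          show (pyHeadsTails (pvSuffixes t' m)).map (fun p => (c :: p.1, t' :: p.2)) = _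
          rw [ih t']
          by_cases h : m ≤ t'.length
          · rw [if_pos h, if_pos (by simp; omega)]
            simp [pvSuffixes_succ]
          · rw [if_neg h, if_neg (by simp; omega)]
            rfl

theorem pvZip_suffixes (m : Nat) (hm : 1 ≤ m) (s : List Char) :
    pyZip (pvSuffixes s m) =
      (List.range (s.length + 1 - m)).map (fun i => (s.drop i).take m) := by
  obtain ⟨m', rfl⟩ : ∃ m', m = m' + 1 := ⟨m - 1, by omega⟩
  clear hm
  induction s with
  | nil =>
      rw [pvSuffixes_succ]
      simp [pyZip, pyZipGo]
  | cons c t ih =>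
      rw [pvSuffixes_succ, List.tail_cons]
      show pyZipGo (c :: t) (pvSuffixes t m') = _
      rw [pyZipGo, pvHeadsTails_suffixes]
      by_cases h : m' ≤ t.length
      · rw [if_pos h]
        have hrec : pyZipGo t (pvSuffixes t.tail m') = pyZip (pvSuffixes t (m' + 1)) := by
          rw [pvSuffixes_succ]; rfl
        show (c :: t.take m') :: pyZipGo t (pvSuffixes t.tail m') = _
        rw [hrec, ih]
        have hlen : (c :: t).length + 1 - (m' + 1) = (t.length + 1 - (m' + 1)) + 1 := by
          simp; omega
        rw [hlen, List.range_succ_eq_map]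
        simp [List.map_map, Function.comp, List.take_succ_cons]
      · rw [if_neg h]
        have h0 : (c :: t).length + 1 - (m' + 1) = 0 := by simp; omega
        rw [h0]
        simp

-- fold of a no-op body is the identity
theorem pvFoldl_noop {α β : Type} (l : List α) (f : β → α → β) (init : β)
    (h : ∀ acc, ∀ x ∈ l, f acc x = acc) : l.foldl f init = init := by
  induction l generalizing init with
  | nil => rfl
  | cons a l ih => simp only [List.foldl_cons, h init a (by simp)]
                   exact ih init (fun acc x hx => h acc x (by simp [hx]))

-- restricting the loop over range(lo, hi) to range(max(lo,1), hi) when n < 1 is a no-op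
theorem pvFoldl_range_max {β : Type} (lo hi : Int) (f g : β → Int → β) (init : β)
    (h0 : ∀ acc n, n < 1 → f acc n = acc)
    (h1 : ∀ acc n, 1 ≤ n → f acc n = g acc n) :
    (PySem.List.pyRange lo hi 1).foldl f init
      = (PySem.List.pyRange (max lo 1) hi 1).foldl g init := by
  rcases (by omega : 1 ≤ lo ∨ lo < 1) with hlo | hlo
  · rw [max_eq_left hlo]
    exact PySem.List.foldl_congr_mem _ f g init
      (fun acc x hx => h1 acc x (le_trans hlo (PySem.List.mem_pyRange_one.mp hx).1))
  · rw [max_eq_right (by omega)]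
    rcases (by omega : hi ≤ 1 ∨ 1 < hi) with hhi | hhi
    · rw [PySem.List.pyRange_one_eq_nil hhi, List.foldl_nil]
      exact pvFoldl_noop _ f init
        (fun acc x hx => h0 acc x (by have := (PySem.List.mem_pyRange_one.mp hx).2; omega))
    · rw [PySem.List.pyRange_one_append lo 1 hi (by omega) (by omega), List.foldl_append,
        pvFoldl_noop _ f init
          (fun acc x hx => h0 acc x (by have := (PySem.List.mem_pyRange_one.mp hx).2; omega))]
      exact PySem.List.foldl_congr_mem _ f g init
        (fun acc x hx => h1 acc x (PySem.List.mem_pyRange_one.mp hx).1)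

-- A's body for n < 1 adds nothing: zip over an empty argument list is empty
theorem pvStepA_noop (padded : List Char) (acc : List (List String)) (n : Int) (hn : n < 1) :
    PySem.Set.union acc
      ((pyZip ((PySem.List.pyRange 0 n 1).map (fun i => PySem.List.slice padded (some i) none))).map
        (fun t => t.map Char.toString)) = acc := by
  rw [PySem.List.pyRange_one_eq_nil (by omega)]
  rfl

-- A's body for 1 ≤ n equals B's inner window loop
theorem pvStep_eq (padded : List Char) (acc : List (List String)) (n : Int) (hn : 1 ≤ n) :
    PySem.Set.union acc
      ((pyZip ((PySem.List.pyRange 0 n 1).map (fun i => PySem.List.slice padded (some i) none))).map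
        (fun t => t.map Char.toString))
    = (PySem.List.pyRange 0 ((padded.length : Int) - n + 1) 1).foldl
        (fun acc2 i =>
          PySem.Set.add acc2 ((PySem.List.slice padded (some i) (some (i + n))).map Char.toString))
        acc := by
  obtain ⟨m, rfl⟩ : ∃ m : Nat, n = (m : Int) := ⟨n.toNat, by omega⟩
  have hm : 1 ≤ m := by exact_mod_cast hn
  have hsufs : (PySem.List.pyRange 0 (m : Int) 1).map (fun i => PySem.List.slice padded (some i) none)
      = pvSuffixes padded m := by
    rw [PySem.List.pyRange_zero_natCast, List.map_map]
    simp [pvSuffixes, Function.comp, PySem.List.slice_from_natCast]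
  -- re-index the Int range of B's inner loop by a Nat range
  have hR : ∀ (g : List (List String) → Int → List (List String)),
      (PySem.List.pyRange 0 ((padded.length : Int) - (m : Int) + 1) 1).foldl g acc
        = (List.range (padded.length + 1 - m)).foldl (fun (a : List (List String)) (k : Nat) => g a (k : Int)) acc := by
    intro g
    rw [PySem.List.pyRange_one,
      (by omega : (((padded.length : Int) - (m : Int) + 1) - 0).toNat = padded.length + 1 - m),
      List.foldl_map]
    exact PySem.List.foldl_congr_mem _ _ _ acc (fun a k _ => by rw [zero_add])
  rw [hsufs, pvZip_suffixes m hm padded, hR]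
  show List.foldl PySem.Set.add acc
      (((List.range (padded.length + 1 - m)).map (fun i => (padded.drop i).take m)).map
        (fun t => t.map Char.toString)) = _
  rw [List.map_map, List.foldl_map]
  refine PySem.List.foldl_congr_mem _ _ _ acc (fun acc2 k _ => ?_)
  rw [Function.comp_apply, PySem.List.slice_natCast_add]

-- ===== VERDICT (by name: the statement is the Claim_ definition above) =====
theorem get_unique_ngrams_spec : Claim_equal_get_unique_ngrams := by
  intro string ngram_range _
  unfold Spec_get_unique_ngrams get_unique_ngrams get_unique_ngrams_alt
  exact pvFoldl_range_max ngram_range.1 (ngram_range.2 + 1) _ _ PySem.Set.empty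
    (fun acc n hn => pvStepA_noop _ acc n hn)
    (fun acc n hn => pvStep_eq _ acc n hn)
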